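-- pv_equiv track=rewrite | github.com/pdschneider/Pearl | Utils/budgetfunctions.py | clean_amount
-- ===== SOURCE A (Python) =====
-- def clean_amount(amount_str):
--     """Extract valid number from amount string"""
--     digits_and_decimal = [c for c in amount_str if c.isdigit() or c == '.']
--     cleaned = ''
--     has_decimal = False
--     for c in digits_and_decimal:
--         if c == '.' and not has_decimal:
--             cleaned += c
--             has_decimal = True
--         elif c.isdigit():
--             cleaned += c
--     if not cleaned:
--         raise ValueError("No valid number found")
--     return cleaned if '.' in cleaned else cleaned + '.0'
-- ===== SOURCE B (Python) =====
-- def clean_amount(amount_str):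
--     """Extract valid number from amount string"""
--     def digits(s):
--         return ''.join(c for c in s if c.isdigit())
--     if '.' in amount_str:
--         before, after = amount_str.split('.', 1)
--         return digits(before) + '.' + digits(after)
--     d = digits(amount_str)
--     if not d:
--         raise ValueError("No valid number found")
--     return d + '.0'
-- ===== Notes on version B (the rewrite author's own statement) =====
-- stated objective: simpler
-- what changed: Instead of a stateful single-pass scan with a has_decimal flag, B splits the string at the first decimal point (if any) and filters the digits of the two halves, gluing them with a single dot; the no-dot case is a plain digit filter plus the integer suffix.
import Mathlib
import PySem

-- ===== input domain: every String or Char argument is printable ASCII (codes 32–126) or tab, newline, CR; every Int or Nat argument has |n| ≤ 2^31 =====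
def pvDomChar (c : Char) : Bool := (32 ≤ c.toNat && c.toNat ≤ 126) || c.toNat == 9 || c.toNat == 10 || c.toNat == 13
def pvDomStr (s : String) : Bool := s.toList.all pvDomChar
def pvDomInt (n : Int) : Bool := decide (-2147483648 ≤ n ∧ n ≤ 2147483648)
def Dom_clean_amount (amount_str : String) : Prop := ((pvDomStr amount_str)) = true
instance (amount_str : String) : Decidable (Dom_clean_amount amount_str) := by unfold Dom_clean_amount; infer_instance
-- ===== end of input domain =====

-- B replaces A's stateful scan (has_decimal flag) by: split at the first decimal point, filter digits on each side.
-- Pre_ excludes exactly the inputs with no digit and no decimal point, on which the Python A raises ValueError.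

-- ===== PORT A =====
def cleanAmountStep (st : List Char × Bool) (c : Char) : List Char × Bool :=
  if c == '.' && !st.2 then (st.1 ++ [c], true)
  else if PySem.Chars.isdigit c then (st.1 ++ [c], st.2)
  else st

def clean_amount (amount_str : String) : String :=
  let digits_and_decimal := amount_str.toList.filter (fun c => PySem.Chars.isdigit c || c == '.')
  let st := digits_and_decimal.foldl cleanAmountStep ([], false)
  if '.' ∈ st.1 then String.mk st.1 else String.mk (st.1 ++ ['.', '0'])

-- ===== PORT B =====
-- split('.', 1) ported as takeWhile/dropWhile at the first '.': exact, since maxsplit=1 splits at the first occurrence of the one-char separator.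
def clean_amount_alt (amount_str : String) : String :=
  let l := amount_str.toList
  if '.' ∈ l then
    let before := (l.takeWhile (· ≠ '.')).filter PySem.Chars.isdigit
    let after := ((l.dropWhile (· ≠ '.')).tail).filter PySem.Chars.isdigit
    String.mk (before ++ '.' :: after)
  else
    let d := l.filter PySem.Chars.isdigit
    String.mk (d ++ ['.', '0'])

-- ===== PRECONDITION & SPEC =====
-- Pre_ excludes exactly the strings with no digit and no '.', on which the Python A raises ValueError.
def Pre_clean_amount (amount_str : String) : Prop :=
  (amount_str.toList.any (fun c => PySem.Chars.isdigit c || c == '.')) = true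
instance (amount_str : String) : Decidable (Pre_clean_amount amount_str) := by unfold Pre_clean_amount; infer_instance

def pvWitness_clean_amount : String := "$ 12.50"

def Spec_clean_amount (amount_str : String) (out : String) : Prop := out = clean_amount_alt amount_str
instance (amount_str : String) (out : String) : Decidable (Spec_clean_amount amount_str out) := by unfold Spec_clean_amount; infer_instance

-- ===== CLAIM (what is proved, stated in full; the proofs are below) =====
def Claim_equal_clean_amount : Prop := ∀ (amount_str : String), Dom_clean_amount amount_str → Pre_clean_amount amount_str → Spec_clean_amount amount_str (clean_amount amount_str)

-- ===== LEMMAS AND PROOFS =====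

-- the step ignores characters that A's list comprehension would have dropped
lemma step_skip (st : List Char × Bool) (c : Char)
    (h : (PySem.Chars.isdigit c || c == '.') = false) : cleanAmountStep st c = st := by
  simp only [Bool.or_eq_false_iff] at h
  simp [cleanAmountStep, h.1, h.2]

lemma fold_filter (l : List Char) (st : List Char × Bool) :
    (l.filter (fun c => PySem.Chars.isdigit c || c == '.')).foldl cleanAmountStep st
      = l.foldl cleanAmountStep st := by
  induction l generalizing st with
  | nil => rfl
  | cons c l ih =>
    by_cases h : (PySem.Chars.isdigit c || c == '.') = true
    · simp [List.filter_cons, h, ih]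
    · simp only [Bool.not_eq_true] at h
      simp [List.filter_cons, h, ih, step_skip _ _ h]

lemma fold_true (l : List Char) (acc : List Char) :
    l.foldl cleanAmountStep (acc, true) = (acc ++ l.filter PySem.Chars.isdigit, true) := by
  induction l generalizing acc with
  | nil => simp
  | cons c l ih =>
    by_cases hd : PySem.Chars.isdigit c
    · simp [cleanAmountStep, hd, List.filter_cons, ih]
    · by_cases hc : c = '.'
      · simp [cleanAmountStep, hc, ih, List.filter_cons,
          show PySem.Chars.isdigit '.' = false by decide]
      · simp [cleanAmountStep, hc, hd, List.filter_cons, ih]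

lemma fold_false (l : List Char) (acc : List Char) :
    l.foldl cleanAmountStep (acc, false)
      = if '.' ∈ l then
          (acc ++ (l.takeWhile (· ≠ '.')).filter PySem.Chars.isdigit
              ++ '.' :: ((l.dropWhile (· ≠ '.')).tail).filter PySem.Chars.isdigit, true)
        else (acc ++ l.filter PySem.Chars.isdigit, false) := by
  induction l generalizing acc with
  | nil => simp
  | cons c l ih =>
    by_cases hc : c = '.'
    · subst hc
      simp [cleanAmountStep, List.takeWhile, List.dropWhile, fold_true]
    · by_cases hd : PySem.Chars.isdigit c
      · have : ('.' ∈ c :: l) = ('.' ∈ l) := by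
          simp [List.mem_cons, Ne.symm hc]
        simp only [List.foldl_cons, cleanAmountStep, hd, if_pos rfl,
          show (c == '.' && !false) = false by simp [hc], Bool.false_eq_true, if_false, if_true, ih]
        by_cases hm : '.' ∈ l
        · simp [hm, this, List.takeWhile, List.dropWhile, hc, List.filter_cons, hd]
        · simp [hm, this, List.filter_cons, hd]
      · have hskip : cleanAmountStep (acc, false) c = (acc, false) := by
          simp [cleanAmountStep, hc, hd]
        simp only [List.foldl_cons, hskip, ih]
        by_cases hm : '.' ∈ l
        · simp [hm, List.mem_cons, hc, Ne.symm hc, List.takeWhile, List.dropWhile,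
            List.filter_cons, hd]
        · simp [hm, List.mem_cons, hd]
          exact fun h => hc (Eq.symm h)

lemma no_dot_in_digits (l : List Char) : '.' ∉ l.filter PySem.Chars.isdigit := by
  intro h
  have := (List.mem_filter.mp h).2
  simp [PySem.Chars.isdigit] at this

-- ===== VERDICT (by name: the statement is the Claim_ definition above) =====
theorem clean_amount_spec : Claim_equal_clean_amount := by
  intro s _ _
  show clean_amount s = clean_amount_alt s
  unfold clean_amount clean_amount_alt
  simp only [fold_filter, fold_false]
  by_cases hm : '.' ∈ s.toList
  · simp [hm]
  · simp [hm, no_dot_in_digits]
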